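-- pv_equiv track=rewrite | github.com/KSchaaij/Stable-and-Personalised-Lexical-Profiles | postprocessing_profiles.py | filter_ngrams
-- ===== SOURCE A (Python) =====
-- def filter_ngrams(ngrams):
--     result = []
--     for n in ngrams:
--         sub = False
--         for other in ngrams:
--             if n != other and n in other:
--                 sub = True
--                 break
--         if not sub:
--             result.append(n)
--     return result
-- ===== SOURCE B (Python) =====
-- def filter_ngrams(ngrams):
--     # Process distinct ngrams longest-first, keeping only maximal ones; a string
--     # dominated by anything is dominated by an already-kept maximal string, so
--     # each candidate is compared against the (small) kept list only.
--     keep = []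
--     for s in sorted(set(ngrams), key=len, reverse=True):
--         if not any(s in t for t in keep):
--             keep.append(s)
--     return [n for n in ngrams if n in keep]
-- ===== Notes on version B (the rewrite author's own statement) =====
-- stated objective: alternative
-- what changed: Instead of comparing every ngram against every other ngram, B sorts the distinct ngrams by length descending once and compares each candidate only against the small list of maximal ngrams kept so far (containment is transitive, so a dominated string is always dominated by a kept maximal one), then filters the original list by membership in that kept set.
import Mathlib
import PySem

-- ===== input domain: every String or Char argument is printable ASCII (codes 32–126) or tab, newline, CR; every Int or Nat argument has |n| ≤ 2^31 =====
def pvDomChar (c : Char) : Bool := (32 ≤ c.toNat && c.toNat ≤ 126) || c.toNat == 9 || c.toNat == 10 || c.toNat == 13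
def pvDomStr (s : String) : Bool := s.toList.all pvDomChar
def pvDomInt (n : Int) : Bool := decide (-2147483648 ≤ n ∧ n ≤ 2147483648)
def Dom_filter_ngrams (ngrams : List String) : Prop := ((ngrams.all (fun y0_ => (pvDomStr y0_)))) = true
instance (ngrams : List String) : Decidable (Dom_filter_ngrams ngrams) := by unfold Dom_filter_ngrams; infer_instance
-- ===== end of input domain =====

-- B replaces A's all-pairs substring scan by a longest-first pass over the distinct
-- ngrams that compares each candidate only against the maximal ngrams kept so far
-- (objective: alternative algorithm; not measured faster).

-- ===== PORT A =====
-- inner loop of A: 'for other in ngrams: if n != other and n in other: sub = True; break'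
def pvHasSuper (n : String) : List String → Bool
  | [] => false
  | other :: rest =>
      if n != other && PySem.Str.isIn n other then true
      else pvHasSuper n rest

def filter_ngrams (ngrams : List String) : List String :=
  ngrams.foldl (fun result n => if pvHasSuper n ngrams then result else result ++ [n]) []

-- ===== PORT B =====
-- 'for s in sorted(set(ngrams), key=len, reverse=True): if not any(s in t for t in keep): keep.append(s)'
def pvKeepLoop (keep : List String) : List String → List String
  | [] => keep
  | s :: rest =>
      if keep.any (fun t => PySem.Str.isIn s t) then pvKeepLoop keep rest
      else pvKeepLoop (keep ++ [s]) rest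

def filter_ngrams_alt (ngrams : List String) : List String :=
  let keep := pvKeepLoop []
    (PySem.List.sorted (PySem.Set.ofList ngrams) (fun s => PySem.Str.len s) true)
  ngrams.filter (fun n => keep.contains n)

-- ===== PRECONDITION & SPEC =====
def Spec_filter_ngrams (ngrams : List String) (out : List String) : Prop := out = filter_ngrams_alt ngrams
instance (ngrams : List String) (out : List String) : Decidable (Spec_filter_ngrams ngrams out) := by unfold Spec_filter_ngrams; infer_instance

-- ===== CLAIM (what is proved, stated in full; the proofs are below) =====
def Claim_equal_filter_ngrams : Prop := ∀ (ngrams : List String), Dom_filter_ngrams ngrams → Spec_filter_ngrams ngrams (filter_ngrams ngrams)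

-- ===== LEMMAS AND PROOFS =====

-- n is a proper substring of some other element of ngrams (A's removal condition)
def pvStrictSub (ngrams : List String) (n : String) : Prop :=
  ∃ t ∈ ngrams, n ≠ t ∧ n.toList <:+: t.toList

lemma pvHasSuper_iff (n : String) (l : List String) :
    pvHasSuper n l = true ↔ ∃ t ∈ l, n ≠ t ∧ n.toList <:+: t.toList := by
  induction l with
  | nil => simp [pvHasSuper]
  | cons other rest ih =>
      unfold pvHasSuper
      by_cases hcond : (n != other && PySem.Str.isIn n other) = true
      · rw [if_pos hcond]
        have hin : PySem.Str.isIn n other = true := by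
          cases hI : PySem.Str.isIn n other
          · rw [hI, Bool.and_false] at hcond; cases hcond
          · rfl
        have hne : n ≠ other := by
          intro h; rw [h, bne_self_eq_false, Bool.false_and] at hcond; cases hcond
        constructor
        · intro _
          exact ⟨other, by simp, hne, (PySem.Str.isIn_iff_infix _ _).mp hin⟩
        · intro _; rfl
      · rw [if_neg hcond, ih]
        have hno : ¬ (n ≠ other ∧ n.toList <:+: other.toList) := by
          rintro ⟨hh1, hh2⟩
          have e1 : (n != other) = true := bne_iff_ne.mpr hh1
          have e2 : PySem.Str.isIn n other = true := (PySem.Str.isIn_iff_infix _ _).mpr hh2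
          exact hcond (by rw [e1, e2]; rfl)
        constructor
        · rintro ⟨t, ht, hp⟩; exact ⟨t, List.mem_cons_of_mem _ ht, hp⟩
        · rintro ⟨t, ht, hp⟩
          rcases List.mem_cons.mp ht with rfl | ht
          · exact absurd hp hno
          · exact ⟨t, ht, hp⟩

lemma filter_ngrams_eq_filter (ngrams : List String) :
    filter_ngrams ngrams = ngrams.filter (fun n => !pvHasSuper n ngrams) := by
  unfold filter_ngrams
  have hfun : (fun (result : List String) (n : String) =>
      if pvHasSuper n ngrams then result else result ++ [n]) =
      (fun acc x => if (!pvHasSuper x ngrams) = true then acc ++ [id x] else acc) := by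
    funext acc x
    cases pvHasSuper x ngrams <;> simp
  rw [hfun, PySem.List.foldl_append_if]
  simp

lemma pvInfix_ne_length_lt (s t : String) (hne : s ≠ t) (h : s.toList <:+: t.toList) :
    s.toList.length < t.toList.length := by
  refine lt_of_le_of_ne h.length_le (fun he => hne ?_)
  exact String.toList_inj.mp (h.eq_of_length he)

-- loop invariant for B's kept-maximal list
lemma pvKeepLoop_spec (ngrams ds : List String)
    (hnd : ds.Nodup)
    (hpw : ds.Pairwise (fun a b => PySem.Str.len b ≤ PySem.Str.len a))
    (hmem : ∀ x, x ∈ ds ↔ x ∈ ngrams) :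
    ∀ rest keep done, ds = done ++ rest →
      (∀ u ∈ keep, u ∈ done) →
      (∀ t ∈ done, ∃ u ∈ keep, t.toList <:+: u.toList) →
      (∀ u ∈ keep, ¬ pvStrictSub ngrams u) →
      (∀ t ∈ done, ¬ pvStrictSub ngrams t → t ∈ keep) →
      ∀ n, n ∈ pvKeepLoop keep rest ↔ (n ∈ done ++ rest ∧ ¬ pvStrictSub ngrams n) := by
  intro rest
  induction rest with
  | nil =>
      intro keep done hsplit h1 h2 h3 h4 n
      simp only [pvKeepLoop, List.append_nil]
      constructor
      · intro hn; exact ⟨h1 n hn, h3 n hn⟩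
      · rintro ⟨hn, hd⟩; exact h4 n hn hd
  | cons s rest' ih =>
      intro keep done hsplit h1 h2 h3 h4 n
      have hsplit' : ds = (done ++ [s]) ++ rest' := by simpa using hsplit
      have hsNotDone : s ∉ done := by
        intro hcmem
        exact List.disjoint_of_nodup_append (hsplit ▸ hnd) hcmem (by simp)
      have hdoneSub : ∀ x ∈ done, x ∈ ngrams := fun x hx =>
        (hmem x).mp (hsplit ▸ List.mem_append_left _ hx)
      by_cases hc : keep.any (fun t => PySem.Str.isIn s t) = true
      · -- s is contained in an already-kept string: skip it
        obtain ⟨u, hu, hinf⟩ := List.any_eq_true.mp hc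
        have hinf : s.toList <:+: u.toList := (PySem.Str.isIn_iff_infix _ _).mp hinf
        have hne : s ≠ u := fun h => hsNotDone (h ▸ h1 u hu)
        have hsDom : pvStrictSub ngrams s :=
          ⟨u, hdoneSub u (h1 u hu), hne, hinf⟩
        have hstep : pvKeepLoop keep (s :: rest') = pvKeepLoop keep rest' := by
          simp only [pvKeepLoop]; rw [if_pos hc]
        rw [hstep]
        rw [ih keep (done ++ [s]) hsplit'
            (fun v hv => List.mem_append_left _ (h1 v hv))
            (by
              intro t ht
              rcases List.mem_append.mp ht with ht | ht
              · exact h2 t ht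
              · simp only [List.mem_singleton] at ht; subst ht
                exact ⟨u, hu, hinf⟩)
            h3
            (by
              intro t ht hd
              rcases List.mem_append.mp ht with ht | ht
              · exact h4 t ht hd
              · simp only [List.mem_singleton] at ht; subst ht
                exact absurd hsDom hd) n]
        constructor
        · rintro ⟨hn, hd⟩; exact ⟨by simpa using hn, hd⟩
        · rintro ⟨hn, hd⟩; exact ⟨by simpa using hn, hd⟩
      · -- s is maximal so far: keep it
        have hnone : ∀ t ∈ keep, ¬ s.toList <:+: t.toList := by
          intro t ht hinf
          exact hc (List.any_eq_true.mpr ⟨t, ht, (PySem.Str.isIn_iff_infix _ _).mpr hinf⟩)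
        have hsFree : ¬ pvStrictSub ngrams s := by
          rintro ⟨t, htmem, hne, hinf⟩
          have hlt := pvInfix_ne_length_lt s t hne hinf
          have htds : t ∈ ds := (hmem t).mpr htmem
          have htdone : t ∈ done := by
            rcases List.mem_append.mp (hsplit ▸ htds) with h | h
            · exact h
            · exfalso
              have hpw' : (s :: rest').Pairwise
                  (fun a b => PySem.Str.len b ≤ PySem.Str.len a) :=
                (hsplit ▸ hpw).sublist (List.suffix_append done (s :: rest')).sublist
              rcases List.mem_cons.mp h with rfl | h
              · exact hne rfl
              · have hle := (List.pairwise_cons.mp hpw').1 t h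
                simp only [PySem.Str.len_eq] at hle
                omega
          obtain ⟨u, hu, huinf⟩ := h2 t htdone
          exact hnone u hu (hinf.trans huinf)
        have hstep : pvKeepLoop keep (s :: rest') = pvKeepLoop (keep ++ [s]) rest' := by
          simp only [pvKeepLoop]; rw [if_neg hc]
        rw [hstep]
        rw [ih (keep ++ [s]) (done ++ [s]) hsplit'
            (by
              intro v hv
              rcases List.mem_append.mp hv with hv | hv
              · exact List.mem_append_left _ (h1 v hv)
              · exact List.mem_append_right _ hv)
            (by
              intro t ht
              rcases List.mem_append.mp ht with ht | ht
              · obtain ⟨u, hu, huinf⟩ := h2 t ht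
                exact ⟨u, List.mem_append_left _ hu, huinf⟩
              · simp only [List.mem_singleton] at ht; subst ht
                exact ⟨t, List.mem_append_right _ (List.mem_singleton_self _),
                  List.infix_rfl⟩)
            (by
              intro u hu
              rcases List.mem_append.mp hu with hu | hu
              · exact h3 u hu
              · simp only [List.mem_singleton] at hu; subst hu
                exact hsFree)
            (by
              intro t ht hd
              rcases List.mem_append.mp ht with ht | ht
              · exact List.mem_append_left _ (h4 t ht hd)
              · exact List.mem_append_right _ ht) n]
        constructor
        · rintro ⟨hn, hd⟩; exact ⟨by simpa using hn, hd⟩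
        · rintro ⟨hn, hd⟩; exact ⟨by simpa using hn, hd⟩

lemma pvKeep_char (ngrams : List String) (n : String) :
    n ∈ pvKeepLoop []
        (PySem.List.sorted (PySem.Set.ofList ngrams) (fun s => PySem.Str.len s) true) ↔
      (n ∈ ngrams ∧ ¬ pvStrictSub ngrams n) := by
  set ds := PySem.List.sorted (PySem.Set.ofList ngrams) (fun s => PySem.Str.len s) true with hds
  have hnd : ds.Nodup :=
    ((PySem.List.sorted_perm (PySem.Set.ofList ngrams) _ true).nodup_iff).mpr
      (PySem.Set.nodup_ofList ngrams)
  have hpw := PySem.List.sorted_pairwise_rev (PySem.Set.ofList ngrams)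
    (fun s => PySem.Str.len s)
  have hmem : ∀ x, x ∈ ds ↔ x ∈ ngrams := by
    intro x
    rw [hds, PySem.List.mem_sorted, PySem.Set.mem_ofList]
  have := pvKeepLoop_spec ngrams ds hnd hpw hmem ds [] [] rfl
    (by simp) (by simp) (by simp) (by simp) n
  rw [this]
  simp [hmem n]

-- ===== VERDICT (by name: the statement is the Claim_ definition above) =====
theorem filter_ngrams_spec : Claim_equal_filter_ngrams := by
  intro ngrams _
  show filter_ngrams ngrams = filter_ngrams_alt ngrams
  rw [filter_ngrams_eq_filter]
  simp only [filter_ngrams_alt]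
  refine List.filter_congr ?_
  intro n hn
  have hk := pvKeep_char ngrams n
  by_cases hd : pvStrictSub ngrams n
  · have h1 : pvHasSuper n ngrams = true := (pvHasSuper_iff n ngrams).mpr hd
    have h2 : n ∉ pvKeepLoop []
        (PySem.List.sorted (PySem.Set.ofList ngrams) (fun s => PySem.Str.len s) true) :=
      fun h => (hk.mp h).2 hd
    simp only [PySem.Str.len_eq, String.length_toList] at h2
    simp [h1, h2]
  · have h1 : pvHasSuper n ngrams = false := by
      cases h : pvHasSuper n ngrams
      · rfl
      · exact absurd ((pvHasSuper_iff n ngrams).mp h) hd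
    have h2 : n ∈ pvKeepLoop []
        (PySem.List.sorted (PySem.Set.ofList ngrams) (fun s => PySem.Str.len s) true) :=
      hk.mpr ⟨hn, hd⟩
    simp only [PySem.Str.len_eq, String.length_toList] at h2
    simp [h1, h2]
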